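-- pv_equiv track=rewrite | github.com/brianoh12/Speech-Recognition-Based-Bilingual-Pronunciation-and-Speaking-Assessment-System | src/english_pronunciation_assessment/phoneme_feedback.py | map_phonemes_to_words
-- ===== SOURCE A (Python) =====
-- def map_phonemes_to_words(correct_phoneme, correct_sentence):
--     """
--     정답 문장의 단어와 음소를 매핑하는 함수
--     - 단어별로 음소를 정확히 배분
--     """
--     phonemes = correct_phoneme.lower().split()
--     words = correct_sentence.lower().split()
--
--     word_phoneme_map = {}
--     phoneme_index = 0
--     total_phonemes = len(phonemes)
--
--     for word in words:
--         word_phonemes = []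
--
--         # 단어당 음소 배정 (비율 기반 정규화)
--         avg_phonemes_per_word = max(1, total_phonemes // len(words))
--         while phoneme_index < len(phonemes) and len(word_phonemes) < avg_phonemes_per_word:
--             word_phonemes.append(phonemes[phoneme_index])
--             phoneme_index += 1
--
--         word_phoneme_map[word] = word_phonemes
--
--     return word_phoneme_map
-- ===== SOURCE B (Python) =====
-- def map_phonemes_to_words(correct_phoneme, correct_sentence):
--     phonemes = correct_phoneme.lower().split()
--     words = correct_sentence.lower().split()
--     if not words:
--         return {}
--     chunk = max(1, len(phonemes) // len(words))
--     return {w: phonemes[i * chunk:(i + 1) * chunk] for i, w in enumerate(words)}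
-- ===== Notes on version B (the rewrite author's own statement) =====
-- stated objective: simpler
-- what changed: Replaces the index-threading while loop inside the for loop with a single dict comprehension assigning each word the contiguous slice phonemes[i*chunk:(i+1)*chunk], after computing chunk once and handling empty words up front.
import Mathlib
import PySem

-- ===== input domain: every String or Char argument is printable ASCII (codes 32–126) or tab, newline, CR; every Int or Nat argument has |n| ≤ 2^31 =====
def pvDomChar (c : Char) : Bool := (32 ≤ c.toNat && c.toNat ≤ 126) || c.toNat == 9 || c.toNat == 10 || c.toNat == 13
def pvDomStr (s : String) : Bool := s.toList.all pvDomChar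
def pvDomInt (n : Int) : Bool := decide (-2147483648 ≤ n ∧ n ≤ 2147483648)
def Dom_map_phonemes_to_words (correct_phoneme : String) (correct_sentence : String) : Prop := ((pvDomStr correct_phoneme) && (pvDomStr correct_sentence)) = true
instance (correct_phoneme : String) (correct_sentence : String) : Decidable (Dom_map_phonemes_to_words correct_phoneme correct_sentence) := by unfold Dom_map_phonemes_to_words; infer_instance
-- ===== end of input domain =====

-- B replaces A's index-threading while loop with one chunk computation and a dict
-- comprehension over contiguous slices (objective: simpler).

-- ===== PORT A =====
-- the inner `while phoneme_index < len(phonemes) and len(word_phonemes) < avg: …` loop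
def pvAWhile (phonemes : List String) (chunk : Nat) (idx : Nat) (acc : List String) :
    List String × Nat :=
  if h : idx < phonemes.length ∧ acc.length < chunk then
    pvAWhile phonemes chunk (idx + 1) (acc ++ [phonemes[idx]])
  else (acc, idx)
termination_by phonemes.length - idx
decreasing_by omega

def map_phonemes_to_words (correct_phoneme : String) (correct_sentence : String) :
    List (String × List String) :=
  let phonemes := PySem.Str.split₀ (PySem.Str.lower correct_phoneme)
  let words := PySem.Str.split₀ (PySem.Str.lower correct_sentence)
  let total_phonemes := phonemes.length
  let st := words.foldl
    (fun (st : PySem.Dict String (List String) × Nat) word =>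
      let chunk := max 1 (total_phonemes / words.length)
      let r := pvAWhile phonemes chunk st.2 []
      (st.1.insert word r.1, r.2))
    (PySem.Dict.empty, 0)
  st.1.items

-- ===== PORT B =====
def map_phonemes_to_words_alt (correct_phoneme : String) (correct_sentence : String) :
    List (String × List String) :=
  let phonemes := PySem.Str.split₀ (PySem.Str.lower correct_phoneme)
  let words := PySem.Str.split₀ (PySem.Str.lower correct_sentence)
  if words = [] then []
  else
    let chunk : Nat := max 1 (phonemes.length / words.length)
    ((PySem.List.enumerate words 0).foldl
      (fun (d : PySem.Dict String (List String)) iw =>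
        d.insert iw.2
          (PySem.List.slice phonemes (some (iw.1 * (chunk : Int)))
            (some ((iw.1 + 1) * (chunk : Int)))))
      PySem.Dict.empty).items

-- ===== PRECONDITION & SPEC =====
def Spec_map_phonemes_to_words (correct_phoneme : String) (correct_sentence : String) (out : List (String × List String)) : Prop := out = map_phonemes_to_words_alt correct_phoneme correct_sentence
instance (correct_phoneme : String) (correct_sentence : String) (out : List (String × List String)) : Decidable (Spec_map_phonemes_to_words correct_phoneme correct_sentence out) := by unfold Spec_map_phonemes_to_words; infer_instance

-- ===== CLAIM (what is proved, stated in full; the proofs are below) =====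
def Claim_equal_map_phonemes_to_words : Prop := ∀ (correct_phoneme : String) (correct_sentence : String), Dom_map_phonemes_to_words correct_phoneme correct_sentence → Spec_map_phonemes_to_words correct_phoneme correct_sentence (map_phonemes_to_words correct_phoneme correct_sentence)

-- ===== LEMMAS AND PROOFS =====

-- the while loop starting at acc = [] takes `chunk` phonemes from index idx
lemma pvAWhile_eq (phonemes : List String) (chunk : Nat) (idx : Nat) (acc : List String)
    (hacc : acc.length ≤ chunk) :
    pvAWhile phonemes chunk idx acc =
      (acc ++ (phonemes.drop idx).take (chunk - acc.length),
       idx + min (chunk - acc.length) (phonemes.length - idx)) := by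
  rw [pvAWhile]
  split
  · rename_i h
    rw [pvAWhile_eq phonemes chunk (idx + 1) (acc ++ [phonemes[idx]'h.1]) (by simp; omega)]
    have hd : phonemes.drop idx = phonemes[idx]'h.1 :: phonemes.drop (idx + 1) :=
      List.drop_eq_getElem_cons h.1
    simp only [Prod.mk.injEq]
    constructor
    · rw [hd]
      have hlen : acc.length < chunk := h.2
      have htk : chunk - acc.length = (chunk - (acc.length + 1)) + 1 := by omega
      rw [htk, List.take_succ_cons]
      simp
    · simp only [List.length_append, List.length_singleton]
      omega
  · rename_i h
    push Not at h
    by_cases hidx : idx < phonemes.length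
    · have : acc.length = chunk := by have := h hidx; omega
      simp [this]
    · have hnil : phonemes.drop idx = [] := List.drop_eq_nil_of_le (by omega)
      simp [hnil]
      omega
termination_by phonemes.length - idx
decreasing_by omega

-- main fold correspondence, generalized over the word position k and the accumulated dict
lemma fold_eq (phonemes : List String) (chunk : Nat) (hchunk : 1 ≤ chunk) :
    ∀ (ws : List String) (k : Nat) (d : PySem.Dict String (List String)),
    (ws.foldl
      (fun (st : PySem.Dict String (List String) × Nat) word =>
        let r := pvAWhile phonemes chunk st.2 []
        (st.1.insert word r.1, r.2))
      (d, min (k * chunk) phonemes.length)).1 =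
    (PySem.List.enumerate ws (k : Int)).foldl
      (fun (d : PySem.Dict String (List String)) iw =>
        d.insert iw.2
          (PySem.List.slice phonemes (some (iw.1 * (chunk : Int)))
            (some ((iw.1 + 1) * (chunk : Int)))))
      d := by
  intro ws
  induction ws with
  | nil => intro k d; simp [PySem.List.enumerate_nil]
  | cons w ws ih =>
    intro k d
    rw [PySem.List.enumerate_cons]
    simp only [List.foldl_cons]
    have hwhile := pvAWhile_eq phonemes chunk (min (k * chunk) phonemes.length) []
      (by simp)
    simp only [List.nil_append, List.length_nil, Nat.sub_zero] at hwhile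
    have hdrop : phonemes.drop (min (k * chunk) phonemes.length) = phonemes.drop (k * chunk) := by
      rcases Nat.le_total (k * chunk) phonemes.length with hle | hle
      · rw [Nat.min_eq_left hle]
      · rw [Nat.min_eq_right hle, List.drop_eq_nil_of_le hle,
          List.drop_eq_nil_of_le (le_refl _)]
    have hslice : PySem.List.slice phonemes (some ((k : Int) * (chunk : Int)))
        (some (((k : Int) + 1) * (chunk : Int)))
        = (phonemes.drop (k * chunk)).take chunk := by
      have h1 : (k : Int) * (chunk : Int) = ((k * chunk : Nat) : Int) := by push_cast; ring
      have h2 : ((k : Int) + 1) * (chunk : Int) = (((k + 1) * chunk : Nat) : Int) := by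
        push_cast; ring
      rw [h1, h2, PySem.List.slice_natCast]
      congr 1
      rw [Nat.succ_mul]
      omega
    have hidxEq : min (k * chunk) phonemes.length
        + min chunk (phonemes.length - min (k * chunk) phonemes.length)
        = min ((k + 1) * chunk) phonemes.length := by
      rw [Nat.succ_mul]
      rcases Nat.le_total (k * chunk) phonemes.length with hle | hle <;> omega
    rw [hwhile, hdrop]
    have hih := ih (k + 1) (d.insert w ((phonemes.drop (k * chunk)).take chunk))
    simp only [hslice]
    rw [hidxEq, show ((k : Int) + 1) = ((k + 1 : Nat) : Int) by push_cast; ring]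
    exact hih

-- ===== VERDICT (by name: the statement is the Claim_ definition above) =====
theorem map_phonemes_to_words_spec : Claim_equal_map_phonemes_to_words := by
  intro cp cs _
  unfold Spec_map_phonemes_to_words map_phonemes_to_words map_phonemes_to_words_alt
  simp only []
  set phonemes := PySem.Str.split₀ (PySem.Str.lower cp) with hph
  set words := PySem.Str.split₀ (PySem.Str.lower cs) with hws
  by_cases hw : words = []
  · simp [hw, PySem.Dict.empty]
  · rw [if_neg hw]
    have h := fold_eq phonemes (max 1 (phonemes.length / words.length))
      (Nat.le_max_left _ _) words 0 PySem.Dict.empty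
    simp only [Nat.zero_mul, Nat.min_eq_left (Nat.zero_le _), Nat.cast_zero] at h
    rw [← h]
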